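-- pv_equiv track=rewrite | github.com/tanakaht/atcoder | problems/abc135/abc135_f.py | z_algorithm
-- ===== SOURCE A (Python) =====
-- def z_algorithm(S):
--     N = len(S)
--     Z_arr = [0] * N
--     Z_arr[0] = N
--     i = 1
--     j = 0
--     while i < N:
--         while i+j < N and S[j] == S[i+j]:
--             j += 1
--         Z_arr[i] = j
--         if j == 0:
--             i += 1
--             continue
--         k = 1
--         while i+k < N and k + Z_arr[k] < j:
--             Z_arr[i+k] = Z_arr[k]
--             k += 1
--         i += k
--         j -= k
--     return Z_arr
-- ===== SOURCE B (Python) =====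
-- def z_algorithm(S):
--     N = len(S)
--     res = []
--     for i in range(N):
--         k = 0
--         while i + k < N and S[k] == S[i + k]:
--             k += 1
--         res.append(k)
--     return res
-- ===== Notes on version B (the rewrite author's own statement) =====
-- stated objective: simpler
-- what changed: Replaces the Z-algorithm's window match-and-copy scheme (carried j, copy loop reusing earlier Z entries) with a direct brute-force scan: for each position i, count matching characters between S and S[i:] from scratch and append the count.
import Mathlib
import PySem

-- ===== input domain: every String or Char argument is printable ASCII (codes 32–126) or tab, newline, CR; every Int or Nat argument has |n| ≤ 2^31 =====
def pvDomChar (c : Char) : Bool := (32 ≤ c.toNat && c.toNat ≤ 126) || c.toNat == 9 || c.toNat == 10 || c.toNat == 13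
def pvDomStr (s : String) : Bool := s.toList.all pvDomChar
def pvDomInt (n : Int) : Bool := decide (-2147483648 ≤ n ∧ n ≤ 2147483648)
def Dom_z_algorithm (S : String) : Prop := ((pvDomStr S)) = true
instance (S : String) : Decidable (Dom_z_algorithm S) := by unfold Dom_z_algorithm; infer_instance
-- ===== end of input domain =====

-- B replaces A's linear-time match-and-copy Z-algorithm by the plain quadratic
-- brute-force scan (for each i, count matches of S against S[i:] from scratch):
-- shorter and simpler, not faster. Return values agree on every non-empty string.

-- ===== PORT A =====
-- inner while: `while i+j < N and S[j] == S[i+j]: j += 1`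
def aExtend (cs : List Char) (N i j : Nat) : Nat :=
  if _h : i + j < N ∧ cs.getD j ' ' = cs.getD (i + j) ' ' then
    aExtend cs N i (j + 1)
  else j
termination_by N - (i + j)
decreasing_by omega

-- copy while: `while i+k < N and k + Z_arr[k] < j: Z_arr[i+k] = Z_arr[k]; k += 1`
def aCopy (N i j : Nat) (Z : List Int) (k : Nat) : List Int × Nat :=
  if _h : i + k < N ∧ (k : Int) + Z.getD k 0 < (j : Int) then
    aCopy N i j (Z.set (i + k) (Z.getD k 0)) (k + 1)
  else (Z, k)
termination_by N - (i + k)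
decreasing_by omega

-- needed by aLoop's termination proof (the copy loop only increases k)
theorem aCopy_k_le (N i j : Nat) (Z : List Int) (k : Nat) : k ≤ (aCopy N i j Z k).2 := by
  induction Z, k using aCopy.induct N i j with
  | case1 Z k h ih => rw [aCopy, dif_pos h]; omega
  | case2 Z k h => rw [aCopy, dif_neg h]

-- outer while: `while i < N: ...`
def aLoop (cs : List Char) (N i j : Nat) (Z : List Int) : List Int :=
  if _h : i < N then
    let j' := aExtend cs N i j
    let Z1 := Z.set i (j' : Int)
    if j' = 0 then aLoop cs N (i + 1) 0 Z1
    else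
      let p := aCopy N i j' Z1 1
      aLoop cs N (i + p.2) (j' - p.2) p.1
  else Z
termination_by N - i
decreasing_by
  · omega
  · have := aCopy_k_le N i (aExtend cs N i j) (Z.set i ((aExtend cs N i j : Nat) : Int)) 1
    omega

def z_algorithm (S : String) : List Int :=
  let cs := S.toList
  let N := cs.length
  aLoop cs N 1 0 ((List.replicate N (0 : Int)).set 0 (N : Int))

-- ===== PORT B =====
-- Source B inner while: `while i + k < N and S[k] == S[i+k]: k += 1`
def bInner (cs : List Char) (N i k : Nat) : Nat :=
  if _h : i + k < N ∧ cs.getD k ' ' = cs.getD (i + k) ' ' then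
    bInner cs N i (k + 1)
  else k
termination_by N - (i + k)
decreasing_by omega

def z_algorithm_alt (S : String) : List Int :=
  let cs := S.toList
  let N := cs.length
  (List.range N).foldl (fun acc i => acc ++ [(bInner cs N i 0 : Int)]) []

-- ===== PRECONDITION & SPEC =====
-- Pre_ excludes only the empty string, on which A raises IndexError (Z_arr[0] = N on the empty list).
def Pre_z_algorithm (S : String) : Prop := S ≠ ""
instance (S : String) : Decidable (Pre_z_algorithm S) := by unfold Pre_z_algorithm; infer_instance
def pvWitness_z_algorithm : String := "aabaaab"

def Spec_z_algorithm (S : String) (out : List Int) : Prop := out = z_algorithm_alt S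
instance (S : String) (out : List Int) : Decidable (Spec_z_algorithm S out) := by unfold Spec_z_algorithm; infer_instance

-- ===== CLAIM (what is proved, stated in full; the proofs are below) =====
def Claim_equal_z_algorithm : Prop := ∀ (S : String), Dom_z_algorithm S → Pre_z_algorithm S → Spec_z_algorithm S (z_algorithm S)

-- ===== LEMMAS AND PROOFS =====

-- longest common prefix of two lists
def lcp : List Char → List Char → Nat
  | a :: s, b :: t => if a = b then lcp s t + 1 else 0
  | _, _ => 0

-- the value the Z-array holds at index i
def zf (cs : List Char) (i : Nat) : Nat := lcp cs (cs.drop i)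

-- "the prefix of cs of length n matches cs at offset i"
def Mt (cs : List Char) (i n : Nat) : Prop := ∀ m, m < n → cs[m]? = cs[i + m]?

theorem lcp_nil_right (s : List Char) : lcp s [] = 0 := by cases s <;> rfl

theorem lcp_le_right (s t : List Char) : lcp s t ≤ t.length := by
  induction s generalizing t with
  | nil => simp [lcp]
  | cons a s ih =>
    cases t with
    | nil => simp [lcp_nil_right]
    | cons b t => simp only [lcp]; split <;> simp [ih]

theorem lcp_get? (s t : List Char) : ∀ m, m < lcp s t → s[m]? = t[m]? := by
  induction s generalizing t with
  | nil => simp [lcp]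
  | cons a s ih =>
    cases t with
    | nil => simp [lcp_nil_right]
    | cons b t =>
      intro m hm
      simp only [lcp] at hm
      split at hm
      · cases m with
        | zero => simp_all
        | succ m => simpa using ih t m (by omega)
      · omega

theorem lcp_max (s t : List Char) (n : Nat) (h : ∀ m, m < n → s[m]? = t[m]?)
    (hs : n ≤ s.length) (ht : n ≤ t.length) : n ≤ lcp s t := by
  induction s generalizing t n with
  | nil => simp at hs; omega
  | cons a s ih =>
    cases t with
    | nil => simp at ht; omega
    | cons b t =>
      cases n with
      | zero => omega
      | succ n =>
        have h0 := h 0 (by omega)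
        simp at h0
        simp only [lcp, if_pos h0]
        have := ih t n (fun m hm => by simpa using h (m + 1) (by omega))
          (by simpa using hs) (by simpa using ht)
        omega

theorem lcp_mismatch (s t : List Char) (hs : lcp s t < s.length) (ht : lcp s t < t.length) :
    s[lcp s t]? ≠ t[lcp s t]? := by
  induction s generalizing t with
  | nil => simp at hs
  | cons a s ih =>
    cases t with
    | nil => simp at ht
    | cons b t =>
      by_cases hab : a = b
      · simp only [lcp, if_pos hab, List.length_cons] at hs ht ⊢
        simpa using ih t (by omega) (by omega)
      · simp only [lcp, if_neg hab, List.length_cons] at hs ht ⊢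
        simpa using hab

theorem lcp_self (s : List Char) : lcp s s = s.length := by
  induction s with
  | nil => rfl
  | cons a s ih => simp [lcp, ih]

theorem zf_match (cs : List Char) (i : Nat) : Mt cs i (zf cs i) := by
  intro m hm
  have := lcp_get? cs (cs.drop i) m hm
  rwa [List.getElem?_drop] at this

theorem zf_le (cs : List Char) (i : Nat) : i + zf cs i ≤ cs.length ∨ cs.length < i := by
  by_cases h : i ≤ cs.length
  · left
    have := lcp_le_right cs (cs.drop i)
    simp [List.length_drop] at this
    unfold zf; omega
  · right; omega

theorem zf_ge (cs : List Char) (i n : Nat) (h : Mt cs i n) (hn : i + n ≤ cs.length) :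
    n ≤ zf cs i := by
  apply lcp_max
  · intro m hm
    rw [List.getElem?_drop]; exact h m hm
  · omega
  · simp [List.length_drop]; omega

theorem zf_mismatch (cs : List Char) (i : Nat) (h : i + zf cs i < cs.length) :
    cs[zf cs i]? ≠ cs[i + zf cs i]? := by
  have h1 := lcp_mismatch cs (cs.drop i) (by unfold zf at *; omega)
    (by simp [List.length_drop]; unfold zf at *; omega)
  rwa [List.getElem?_drop] at h1

-- the Z-algorithm's core fact: inside the window the earlier value is copied verbatim

theorem getD_set_eq (Z : List Int) (p : Nat) (v : Int) (h : p < Z.length) :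
    (Z.set p v).getD p 0 = v := by
  simp [List.getD_eq_getElem?_getD, List.getElem?_set_self h]

theorem getD_set_ne (Z : List Int) (p t : Nat) (v : Int) (h : p ≠ t) :
    (Z.set p v).getD t 0 = Z.getD t 0 := by
  simp [List.getD_eq_getElem?_getD, List.getElem?_set_ne h]

theorem getD_eq_iff (cs : List Char) (p q : Nat) (hp : p < cs.length) (hq : q < cs.length) :
    cs.getD p ' ' = cs.getD q ' ' ↔ cs[p]? = cs[q]? := by
  rw [List.getD_eq_getElem _ _ hp, List.getD_eq_getElem _ _ hq,
      List.getElem?_eq_getElem hp, List.getElem?_eq_getElem hq]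
  simp

theorem zf_copy (cs : List Char) (i k : Nat) (hi : 1 ≤ i) (hk : 1 ≤ k)
    (h : k + zf cs k < zf cs i) : zf cs (i + k) = zf cs k := by
  have hil : i ≤ cs.length := by
    by_contra hc
    have hd : cs.drop i = [] := List.drop_eq_nil_of_le (by omega)
    have : zf cs i = 0 := by rw [zf, hd, lcp_nil_right]
    omega
  have hjle : i + zf cs i ≤ cs.length := by
    rcases zf_le cs i with h1 | h1 <;> omega
  have hge : zf cs k ≤ zf cs (i + k) := by
    apply zf_ge
    · intro m hm
      have e1 : cs[m]? = cs[k + m]? := zf_match cs k m hm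
      have e2 : cs[k + m]? = cs[i + (k + m)]? := zf_match cs i (k + m) (by omega)
      simpa [Nat.add_assoc] using e1.trans e2
    · omega
  have hle : zf cs (i + k) ≤ zf cs k := by
    by_contra hc
    have e1 : cs[zf cs k]? = cs[(i + k) + zf cs k]? := zf_match cs (i + k) (zf cs k) (by omega)
    have e2 : cs[k + zf cs k]? = cs[i + (k + zf cs k)]? := zf_match cs i (k + zf cs k) (by omega)
    have hmm : cs[zf cs k]? ≠ cs[k + zf cs k]? := zf_mismatch cs k (by omega)
    apply hmm
    rw [e1, ← Nat.add_assoc] at *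
    exact e1.trans e2.symm
  omega

theorem aExtend_correct (cs : List Char) (N i : Nat) (hN : N = cs.length) :
    ∀ (j : Nat), Mt cs i j → i + j ≤ N → aExtend cs N i j = zf cs i := by
  intro j
  induction j using aExtend.induct cs N i with
  | case1 j h ih =>
    intro hM hij
    rw [aExtend, dif_pos h]
    apply ih
    · intro m hm
      rcases Nat.lt_or_ge m j with hmj | hmj
      · exact hM m hmj
      · have hmj' : m = j := by omega
        subst hmj'
        exact (getD_eq_iff cs m (i + m) (by omega) (by omega)).mp h.2
    · omega
  | case2 j h =>
    intro hM hij
    rw [aExtend, dif_neg h]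
    rw [not_and] at h
    have hge : j ≤ zf cs i := zf_ge cs i j hM (by omega)
    rcases Nat.lt_or_ge (i + j) N with hjN | hjN
    · have hne := h hjN
      by_contra hc
      have hlt : j < zf cs i := by omega
      have := zf_match cs i j hlt
      exact hne ((getD_eq_iff cs j (i + j) (by omega) (by omega)).mpr this)
    · have hle : i + zf cs i ≤ cs.length := by
        rcases zf_le cs i with h1 | h1 <;> omega
      omega

theorem bInner_eq_aExtend (cs : List Char) (N i k : Nat) :
    bInner cs N i k = aExtend cs N i k := by
  induction k using bInner.induct cs N i with
  | case1 k h ih => rw [bInner, dif_pos h, aExtend, dif_pos h]; exact ih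
  | case2 k h => rw [bInner, dif_neg h, aExtend, dif_neg h]

theorem aCopy_correct (cs : List Char) (N i j' : Nat)
    (hN : N = cs.length) (hi1 : 1 ≤ i) (_hiN : i < N) (hj : zf cs i = j') :
    ∀ (Z : List Int) (k : Nat), Z.length = N → 1 ≤ k → k ≤ j' → i + k ≤ N →
    (∀ t, t < i + k → Z.getD t 0 = (zf cs t : Int)) →
    (aCopy N i j' Z k).1.length = N ∧
    k ≤ (aCopy N i j' Z k).2 ∧ (aCopy N i j' Z k).2 ≤ j' ∧
    i + (aCopy N i j' Z k).2 ≤ N ∧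
    (∀ t, t < i + (aCopy N i j' Z k).2 → (aCopy N i j' Z k).1.getD t 0 = (zf cs t : Int)) ∧
    (i + (aCopy N i j' Z k).2 = N ∨ (j' : Int) ≤ ((aCopy N i j' Z k).2 : Int) + (zf cs (aCopy N i j' Z k).2 : Int)) := by
  intro Z k
  induction Z, k using aCopy.induct N i j' with
  | case1 Z k h ih =>
    intro hZl hk1 hkj hik hZ
    have hki : k < i + k := by omega
    have hZk : Z.getD k 0 = (zf cs k : Int) := hZ k hki
    have hcond : k + zf cs k < j' := by
      have := h.2
      rw [hZk] at this
      exact_mod_cast this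
    have hcopy : zf cs (i + k) = zf cs k := zf_copy cs i k hi1 hk1 (by omega)
    have hZ' : ∀ t, t < i + (k + 1) → (Z.set (i + k) (Z.getD k 0)).getD t 0 = (zf cs t : Int) := by
      intro t ht
      rcases Nat.lt_or_ge t (i + k) with htk | htk
      · rw [getD_set_ne _ _ _ _ (by omega)]
        exact hZ t htk
      · have ht' : t = i + k := by omega
        subst ht'
        rw [getD_set_eq _ _ _ (by omega), hZk, hcopy]
    have hrec := ih (by simpa using hZl) (by omega) (by omega) (by omega) hZ'
    rw [aCopy, dif_pos h]
    exact ⟨hrec.1, by omega, hrec.2.2⟩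
  | case2 Z k h =>
    intro hZl hk1 hkj hik hZ
    rw [aCopy, dif_neg h]
    rw [not_and] at h
    refine ⟨hZl, le_refl k, hkj, hik, hZ, ?_⟩
    show i + k = N ∨ (j' : Int) ≤ (k : Int) + (zf cs k : Int)
    rcases Nat.lt_or_ge (i + k) N with hikN | hikN
    · right
      have h2 := h hikN
      rw [hZ k (by omega)] at h2
      omega
    · left; omega

theorem aLoop_correct (cs : List Char) (N : Nat) (hN : N = cs.length) :
    ∀ (i j : Nat) (Z : List Int), 1 ≤ i → i + j ≤ N → Mt cs i j → Z.length = N →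
    (∀ t, t < i → Z.getD t 0 = (zf cs t : Int)) →
    (aLoop cs N i j Z).length = N ∧
    ∀ t, t < N → (aLoop cs N i j Z).getD t 0 = (zf cs t : Int) := by
  intro i j Z
  induction i, j, Z using aLoop.induct cs N with
  | case1 i j Z h jv Zv h0 ih =>
    -- extend found nothing: j' = 0, advance i by one
    intro hi1 hij hM hZl hZ
    have hjv : jv = aExtend cs N i j := rfl
    have hE : jv = zf cs i := hjv.trans (aExtend_correct cs N i hN j hM hij)
    have hZv : Zv = Z.set i ((jv : Nat) : Int) := rfl
    rw [aLoop, dif_pos h]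
    simp only [← hjv]
    rw [← hZv, if_pos h0]
    apply ih
    · omega
    · omega
    · intro m hm; omega
    · rw [hZv]; simpa using hZl
    · intro t ht
      rw [hZv]
      rcases Nat.lt_or_ge t i with hti | hti
      · rw [getD_set_ne _ _ _ _ (by omega)]
        exact hZ t hti
      · have ht' : t = i := by omega
        subst ht'
        rw [getD_set_eq _ _ _ (by omega), hE]
  | case2 i j Z h jv Zv h0 pv ih =>
    -- j' > 0: set Z[i] := j', run the copy loop, jump
    intro hi1 hij hM hZl hZ
    have hjv : jv = aExtend cs N i j := rfl
    have hE : jv = zf cs i := hjv.trans (aExtend_correct cs N i hN j hM hij)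
    have hZv : Zv = Z.set i ((jv : Nat) : Int) := rfl
    have hzle : i + zf cs i ≤ N := by
      rcases zf_le cs i with h1 | h1 <;> omega
    have hZ1 : ∀ t, t < i + 1 → Zv.getD t 0 = (zf cs t : Int) := by
      intro t ht
      rw [hZv]
      rcases Nat.lt_or_ge t i with hti | hti
      · rw [getD_set_ne _ _ _ _ (by omega)]
        exact hZ t hti
      · have ht' : t = i := by omega
        subst ht'
        rw [getD_set_eq _ _ _ (by omega), hE]
    have hC := aCopy_correct cs N i jv hN hi1 h hE.symm Zv 1
      (by rw [hZv]; simpa using hZl) (le_refl 1) (by omega) (by omega) hZ1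
    have hpv : pv = aCopy N i jv Zv 1 := rfl
    rw [← hpv] at hC
    obtain ⟨hC1, hC2, hC3, hC4, hC5, hC6⟩ := hC
    rw [aLoop, dif_pos h]
    simp only [← hjv]
    rw [← hZv, if_neg h0, ← hpv]
    apply ih
    · omega
    · omega
    · -- matched prefix carried into the next round
      intro m hm
      rcases hC6 with hend | hwin
      · omega
      · have hwin' : jv ≤ pv.2 + zf cs pv.2 := by exact_mod_cast hwin
        have e1 : cs[m]? = cs[pv.2 + m]? := zf_match cs pv.2 m (by omega)
        have e2 : cs[pv.2 + m]? = cs[i + (pv.2 + m)]? := by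
          refine zf_match cs i (pv.2 + m) ?_
          rw [← hE]
          omega
        simpa [Nat.add_assoc] using e1.trans e2
    · exact hC1
    · intro t ht
      exact hC5 t (by omega)
  | case3 i j Z h =>
    intro hi1 hij hM hZl hZ
    rw [aLoop, dif_neg h]
    exact ⟨hZl, fun t ht => hZ t (by omega)⟩

theorem foldl_append_map (f : Nat → Int) (l : List Nat) (acc : List Int) :
    l.foldl (fun a i => a ++ [f i]) acc = acc ++ l.map f := by
  induction l generalizing acc with
  | nil => simp
  | cons x l ih => simp [List.foldl, ih]

-- ===== VERDICT (by name: the statement is the Claim_ definition above) =====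
theorem z_algorithm_spec : Claim_equal_z_algorithm := by
  intro S _hD hP
  unfold Spec_z_algorithm z_algorithm z_algorithm_alt
  have hne : S.toList ≠ [] := by simpa [String.toList_eq_nil_iff] using hP
  have hN1 : 1 ≤ S.toList.length := by
    cases h : S.toList with
    | nil => exact absurd h hne
    | cons a l => simp
  set cs := S.toList with hcs
  set N := cs.length with hNdef
  have hZ0l : ((List.replicate N (0 : Int)).set 0 (N : Int)).length = N := by simp
  have hZ0 : ∀ t, t < 1 → ((List.replicate N (0 : Int)).set 0 (N : Int)).getD t 0 = (zf cs t : Int) := by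
    intro t ht
    have ht0 : t = 0 := by omega
    subst ht0
    rw [getD_set_eq _ _ _ (by simpa using hN1)]
    have : zf cs 0 = N := by simp [zf, lcp_self]; omega
    rw [this]
  have hA := aLoop_correct cs N rfl 1 0 ((List.replicate N (0 : Int)).set 0 (N : Int))
    (le_refl 1) (by omega) (fun m hm => by omega) hZ0l hZ0
  have hB : (List.range N).foldl (fun acc i => acc ++ [((bInner cs N i 0 : Nat) : Int)]) [] =
      (List.range N).map (fun i => ((zf cs i : Nat) : Int)) := by
    rw [foldl_append_map]
    simp only [List.nil_append]
    apply List.map_congr_left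
    intro t htm
    have htN : t < N := List.mem_range.mp htm
    rw [bInner_eq_aExtend, aExtend_correct cs N t rfl 0 (fun m hm => by omega) (by omega)]
  have hgoal : aLoop cs N 1 0 ((List.replicate N (0 : Int)).set 0 (N : Int)) =
      (List.range N).map (fun i => ((zf cs i : Nat) : Int)) := by
    apply List.ext_getElem
    · simp [hA.1]
    · intro t h1 h2
      have htN : t < N := by rw [← hA.1]; exact h1
      have hv := hA.2 t htN
      rw [List.getD_eq_getElem?_getD, List.getElem?_eq_getElem h1] at hv
      simp only [Option.getD_some] at hv
      rw [hv]
      simp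

  rw [hB]
  exact hgoal
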